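-- pv_equiv track=rewrite | github.com/Playinf/nnjm | script/build_nnjm_ngram.py | get_affiliation
-- ===== SOURCE A (Python) =====
-- def get_affiliation(pos, align_vec):
--     pos_list = align_vec[pos]
--     size = len(align_vec)
--
--     # Affiliation heuristics - see Devlin t al. p1371
--     if not pos_list:
--         # pos has no alignment, look right, then left, then right-right,
--         # then left-left etc
--         rpos = pos + 1
--         lpos = pos - 1
--         while rpos < size or lpos >= 0:
--             if rpos < size and align_vec[rpos]:
--                 pos_list = align_vec[rpos]
--                 break
--             if lpos >= 0 and align_vec[lpos]:
--                 pos_list = align_vec[lpos]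
--                 break
--             rpos += 1
--             lpos -= 1
--
--     if not pos_list:
--         raise Exception('No alignments in sentence')
--
--     # index of the aligned word in the middle
--     midpos = int((len(pos_list) - 1) / 2)
--     index = sorted(pos_list)[midpos]
--
--     return index
-- ===== SOURCE B (Python) =====
-- def get_affiliation(pos, align_vec):
--     pos_list = align_vec[pos]
--     if not pos_list:
--         cand = [i for i, a in enumerate(align_vec) if a]
--         if not cand:
--             raise Exception('No alignments in sentence')
--         # distance dominates; on a tie the right neighbour (i > pos) wins
--         best = min(cand, key=lambda i: 2 * abs(i - pos) + (i < pos))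
--         pos_list = align_vec[best]
--     return sorted(pos_list)[(len(pos_list) - 1) // 2]
-- ===== Notes on version B (the rewrite author's own statement) =====
-- stated objective: idiomatic
-- what changed: Replaced the outward two-pointer while-loop by a single comprehension collecting all aligned indices and one min() with the key 2*|i-pos|+(i<pos) (distance dominates, right wins ties), then the median by (len-1)//2 directly.
-- outside the precondition, e.g. on get_affiliation(-3, [[], [7], [], [9], []]): A returns 9, B returns 7
import Mathlib
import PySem

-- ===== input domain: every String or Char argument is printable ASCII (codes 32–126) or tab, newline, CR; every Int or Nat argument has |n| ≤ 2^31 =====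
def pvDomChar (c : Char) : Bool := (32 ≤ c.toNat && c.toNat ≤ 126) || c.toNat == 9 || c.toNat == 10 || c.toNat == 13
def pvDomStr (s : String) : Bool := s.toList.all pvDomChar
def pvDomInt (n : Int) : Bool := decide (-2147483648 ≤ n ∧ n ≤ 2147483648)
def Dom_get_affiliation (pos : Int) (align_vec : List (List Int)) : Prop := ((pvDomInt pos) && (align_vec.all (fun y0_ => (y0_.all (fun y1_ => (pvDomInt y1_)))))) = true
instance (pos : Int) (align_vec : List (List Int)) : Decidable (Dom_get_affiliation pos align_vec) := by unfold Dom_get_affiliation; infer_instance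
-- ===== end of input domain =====

-- B replaces A's outward two-pointer scan by a one-pass candidate collection plus
-- min() with the key 2*|i-pos| + (i<pos); equivalence of the RETURN value on Pre_.

-- ===== PORT A =====
-- A's while loop (rpos moves right, lpos moves left, right checked first)
def gaScan (av : List (List Int)) (size rpos lpos : Int) : List Int :=
  if rpos < size ∨ 0 ≤ lpos then
    if rpos < size ∧ (PySem.List.pyGet? av rpos).getD [] ≠ [] then
      (PySem.List.pyGet? av rpos).getD []
    else if 0 ≤ lpos ∧ (PySem.List.pyGet? av lpos).getD [] ≠ [] then
      (PySem.List.pyGet? av lpos).getD []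
    else gaScan av size (rpos + 1) (lpos - 1)
  else []
termination_by ((size - rpos).toNat + (lpos + 1).toNat)
decreasing_by omega

def get_affiliation (pos : Int) (align_vec : List (List Int)) : Int :=
  let pos_list := (PySem.List.pyGet? align_vec pos).getD []
  let size : Int := align_vec.length
  let pos_list := if pos_list = [] then gaScan align_vec size (pos + 1) (pos - 1) else pos_list
  if pos_list = [] then 0  -- 'raise Exception': unreachable under Pre_
  else (PySem.List.sorted pos_list (fun x => x) false).getD ((pos_list.length - 1) / 2) 0

-- ===== PORT B =====
def get_affiliation_alt (pos : Int) (align_vec : List (List Int)) : Int :=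
  let pos_list := (PySem.List.pyGet? align_vec pos).getD []
  let pos_list :=
    if pos_list = [] then
      let cand := ((PySem.List.enumerate align_vec).filter (fun p => decide (p.2 ≠ []))).map (fun p => p.1)
      match PySem.List.min? cand (fun i => 2 * |i - pos| + (if i < pos then 1 else 0)) with
      | none => []  -- 'raise Exception': unreachable under Pre_
      | some best => (PySem.List.pyGet? align_vec best).getD []
    else pos_list
  if pos_list = [] then 0
  else (PySem.List.sorted pos_list (fun x => x) false).getD ((pos_list.length - 1) / 2) 0

-- ===== PRECONDITION & SPEC =====
-- Pre_ excludes out-of-range pos (A raises IndexError), sentences with no alignment at all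
-- (A raises a bare Exception), and negative in-range pos whose wrapped entry is empty, where
-- A's scan re-wraps its negative running indices and the visiting order is an accidental
-- artefact of Python's negative indexing (both results are defensible there).
def Pre_get_affiliation (pos : Int) (align_vec : List (List Int)) : Prop :=
  (0 ≤ pos ∧ pos < (align_vec.length : Int) ∧ ∃ l ∈ align_vec, l ≠ []) ∨
  (-(align_vec.length : Int) ≤ pos ∧ pos < 0 ∧ (PySem.List.pyGet? align_vec pos).getD [] ≠ [])
instance (pos : Int) (align_vec : List (List Int)) : Decidable (Pre_get_affiliation pos align_vec) := by
  unfold Pre_get_affiliation; infer_instance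

def pvWitness_get_affiliation : Int × List (List Int) := (1, [[3, 1], [0]])

def Spec_get_affiliation (pos : Int) (align_vec : List (List Int)) (out : Int) : Prop := out = get_affiliation_alt pos align_vec
instance (pos : Int) (align_vec : List (List Int)) (out : Int) : Decidable (Spec_get_affiliation pos align_vec out) := by unfold Spec_get_affiliation; infer_instance

-- ===== CLAIM (what is proved, stated in full; the proofs are below) =====
def Claim_equal_get_affiliation : Prop := ∀ (pos : Int) (align_vec : List (List Int)), Dom_get_affiliation pos align_vec → Pre_get_affiliation pos align_vec → Spec_get_affiliation pos align_vec (get_affiliation pos align_vec)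

-- ===== LEMMAS AND PROOFS =====

-- membership in B's candidate list
lemma mem_cand (av : List (List Int)) (i : Int) :
    i ∈ ((PySem.List.enumerate av).filter (fun p => decide (p.2 ≠ []))).map (fun p => p.1) ↔
    0 ≤ i ∧ i < (av.length : Int) ∧ (PySem.List.pyGet? av i).getD [] ≠ [] := by
  simp only [List.mem_map, List.mem_filter, PySem.List.mem_enumerate_iff]
  constructor
  · rintro ⟨p, ⟨⟨k, hk, rfl⟩, hne⟩, rfl⟩
    simp only [decide_eq_true_eq] at hne
    refine ⟨by positivity, by simpa using hk, ?_⟩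
    simp [PySem.List.pyGet?_natCast, List.getElem?_eq_getElem hk]
    simpa using hne
  · rintro ⟨h0, h1, hne⟩
    lift i to ℕ using h0 with k
    have hk : k < av.length := by exact_mod_cast h1
    refine ⟨(k, av[k]), ⟨⟨k, hk, by simp⟩, ?_⟩, rfl⟩
    simp only [decide_eq_true_eq]
    rw [PySem.List.pyGet?_natCast, List.getElem?_eq_getElem hk] at hne
    simpa using hne

-- A's scan stops exactly at the key-minimal aligned index
lemma gaScan_eq (av : List (List Int)) (pos best : Int)
    (hp0 : 0 ≤ pos) (hp1 : pos < (av.length : Int))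
    (hb0 : 0 ≤ best) (hb1 : best < (av.length : Int))
    (hbne : (PySem.List.pyGet? av best).getD [] ≠ [])
    (hmin : ∀ i, 0 ≤ i → i < (av.length : Int) → (PySem.List.pyGet? av i).getD [] ≠ [] →
      2 * |best - pos| + (if best < pos then 1 else 0) ≤ 2 * |i - pos| + (if i < pos then 1 else 0)) :
    ∀ (k : Nat) (d : Int), 1 ≤ d →
      k = ((av.length : Int) - (pos + d)).toNat + ((pos - d) + 1).toNat →
      (∀ i, 0 ≤ i → i < (av.length : Int) → (PySem.List.pyGet? av i).getD [] ≠ [] → d ≤ |i - pos|) →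
      gaScan av (av.length : Int) (pos + d) (pos - d) = (PySem.List.pyGet? av best).getD [] := by
  intro k
  induction k using Nat.strong_induction_on with
  | _ k IH =>
    intro d hd hk hbound
    have hdb : d ≤ |best - pos| := hbound best hb0 hb1 hbne
    rw [gaScan]
    by_cases hcond : pos + d < (av.length : Int) ∨ 0 ≤ pos - d
    · rw [if_pos hcond]
      by_cases h1 : pos + d < (av.length : Int) ∧ (PySem.List.pyGet? av (pos + d)).getD [] ≠ []
      · rw [if_pos h1]
        have hkey := hmin (pos + d) (by omega) h1.1 h1.2
        have : best = pos + d := by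
          rcases abs_cases (best - pos) with ⟨he, _⟩ | ⟨he, _⟩ <;>
          rcases abs_cases (pos + d - pos) with ⟨he2, _⟩ | ⟨he2, _⟩ <;>
          split_ifs at hkey <;> omega
        rw [this]
      · rw [if_neg h1]
        by_cases h2 : 0 ≤ pos - d ∧ (PySem.List.pyGet? av (pos - d)).getD [] ≠ []
        · rw [if_pos h2]
          have hkey := hmin (pos - d) h2.1 (by omega) h2.2
          have hbestnot : ¬ (best = pos + d) := by
            rintro rfl
            exact h1 ⟨hb1, hbne⟩
          have : best = pos - d := by
            rcases abs_cases (best - pos) with ⟨he, _⟩ | ⟨he, _⟩ <;>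
            rcases abs_cases (pos - d - pos) with ⟨he2, _⟩ | ⟨he2, _⟩ <;>
            split_ifs at hkey <;> omega
          rw [this]
        · rw [if_neg h2]
          have harr : pos + d + 1 = pos + (d + 1) := by ring
          have harr2 : pos - d - 1 = pos - (d + 1) := by ring
          rw [harr, harr2]
          refine IH (((av.length : Int) - (pos + (d + 1))).toNat + ((pos - (d + 1)) + 1).toNat)
            (by omega) (d + 1) (by omega) rfl ?_
          intro i hi0 hi1 hine
          have := hbound i hi0 hi1 hine
          have hne1 : i ≠ pos + d := by rintro rfl; exact h1 ⟨hi1, hine⟩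
          have hne2 : i ≠ pos - d := by rintro rfl; exact h2 ⟨hi0, hine⟩
          rcases abs_cases (i - pos) with ⟨he, _⟩ | ⟨he, _⟩ <;> omega
    · exfalso
      rcases abs_cases (best - pos) with ⟨he, _⟩ | ⟨he, _⟩ <;> omega

-- ===== VERDICT (by name: the statement is the Claim_ definition above) =====
theorem get_affiliation_spec : Claim_equal_get_affiliation := by
  intro pos av hdom hpre
  unfold Spec_get_affiliation
  show get_affiliation pos av = get_affiliation_alt pos av
  unfold get_affiliation get_affiliation_alt
  by_cases h0 : (PySem.List.pyGet? av pos).getD [] = []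
  · rcases hpre with ⟨hp0, hp1, l, hl, hlne⟩ | ⟨_, _, hne⟩
    · -- the scan case
      obtain ⟨k, hk, rfl⟩ := List.mem_iff_getElem.mp hl
      have hkc : ((k : Int)) ∈ ((PySem.List.enumerate av).filter (fun p => decide (p.2 ≠ []))).map (fun p => p.1) := by
        refine (mem_cand av k).mpr ⟨by positivity, by exact_mod_cast hk, ?_⟩
        rw [PySem.List.pyGet?_natCast, List.getElem?_eq_getElem hk]
        simpa using hlne
      cases hmin : PySem.List.min?
          (((PySem.List.enumerate av).filter (fun p => decide (p.2 ≠ []))).map (fun p => p.1))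
          (fun i => 2 * |i - pos| + (if i < pos then 1 else 0)) with
      | none =>
        rw [PySem.List.min?_eq_none_iff] at hmin
        rw [hmin] at hkc
        simp at hkc
      | some best =>
        obtain ⟨hb0, hb1, hbne⟩ := (mem_cand av best).mp (PySem.List.min?_mem hmin)
        have hminle := PySem.List.min?_isMin hmin
        have hmin' : ∀ i, 0 ≤ i → i < (av.length : Int) → (PySem.List.pyGet? av i).getD [] ≠ [] →
            2 * |best - pos| + (if best < pos then 1 else 0) ≤ 2 * |i - pos| + (if i < pos then 1 else 0) :=
          fun i hi0 hi1 hine => hminle i ((mem_cand av i).mpr ⟨hi0, hi1, hine⟩)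
        have hscan := gaScan_eq av pos best hp0 hp1 hb0 hb1 hbne hmin'
          (((av.length : Int) - (pos + 1)).toNat + ((pos - 1) + 1).toNat) 1 (by omega) rfl
          (by
            intro i hi0 hi1 hine
            have : i ≠ pos := by rintro rfl; exact hine h0
            rcases abs_cases (i - pos) with ⟨he, _⟩ | ⟨he, _⟩ <;> omega)
        simp only [h0, if_pos, hmin]
        rw [hscan]
    · exact absurd h0 hne
  · simp only [if_neg h0]
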